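-- pv_equiv track=rewrite | github.com/MDyakova/primer_design_tool | container/src/utilities.py | guide_info
-- ===== SOURCE A (Python) =====
-- def guide_info(guide_seq, ensemble_gene_seq):
--     """
--     Search guide position in ensemble sequence.
--     If we have two guides (TGEE) it should be separated by ;.
--     If we have one guide (Cas9) it is single sequence.
--     Output is sequence between two guides (included guides sequences)
--     on one strand.
--     """
--
--     compl_dict = {"A": "T", "T": "A", "G": "C", "C": "G"}
--
--     if ";" not in guide_seq:
--         if len(guide_seq) > 23:
--             right_guide = guide_seq[-20:]
--             left_guide = "".join([compl_dict[i] for i in guide_seq[:20]][::-1])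
--             guide_seq = ";".join([left_guide, right_guide])
--     if ";" not in guide_seq:
--         if guide_seq not in ensemble_gene_seq:
--             guide = "".join([compl_dict[i] for i in guide_seq][::-1])
--         else:
--             guide = guide_seq
--     else:
--         left_guide, right_guide = guide_seq.split(";")
--         left_guide = left_guide.strip()
--         right_guide = right_guide.strip()
--
--         if left_guide not in ensemble_gene_seq:
--             left_guide = "".join([compl_dict[i] for i in left_guide][::-1])
--         if right_guide not in ensemble_gene_seq:
--             right_guide = "".join([compl_dict[i] for i in right_guide][::-1])
--
--         left_guide_start = len(ensemble_gene_seq.split(left_guide)[0])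
--         right_guide_start = len(ensemble_gene_seq.split(right_guide)[0])
--
--         if left_guide_start > right_guide_start:
--             guide = (
--                 right_guide
--                 + ensemble_gene_seq.split(right_guide)[1].split(left_guide)[0]
--                 + left_guide
--             )
--         else:
--             guide = (
--                 left_guide
--                 + ensemble_gene_seq.split(left_guide)[1].split(right_guide)[0]
--                 + right_guide
--             )
--
--     return guide
-- ===== SOURCE B (Python) =====
-- # Simpler: the two-guide region is one contiguous slice of the gene, taken between
-- # the min and max of the two guide start indices (index() raises if a guide is absent).
--
-- def _revcomp(seq):
--     compl_dict = {"A": "T", "T": "A", "G": "C", "C": "G"}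
--     return "".join(compl_dict[c] for c in reversed(seq))
--
--
-- def guide_info(guide_seq, ensemble_gene_seq):
--     if ";" not in guide_seq:
--         if len(guide_seq) > 23:
--             guide_seq = _revcomp(guide_seq[:20]) + ";" + guide_seq[-20:]
--         else:
--             return guide_seq if guide_seq in ensemble_gene_seq else _revcomp(guide_seq)
--     g1, g2 = (g.strip() for g in guide_seq.split(";"))
--     if g1 not in ensemble_gene_seq:
--         g1 = _revcomp(g1)
--     if g2 not in ensemble_gene_seq:
--         g2 = _revcomp(g2)
--     i = ensemble_gene_seq.index(g1)
--     j = ensemble_gene_seq.index(g2)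
--     start = min(i, j)
--     end = max(i, j) + (len(g2) if i <= j else len(g1))
--     return ensemble_gene_seq[start:end]
-- ===== Notes on version B (the rewrite author's own statement) =====
-- stated objective: simpler
-- what changed: The two-guide branch returns one contiguous slice of the gene between min and max of the two guide start indices instead of A's split-and-concatenate assembly from string fragments; Pre_ excludes two-guide inputs where a resolved guide is absent from the gene (B's index() raises there) and where guide occurrences overlap or a duplicate occurrence of the earlier guide cuts A's split piece short, corners on which A's split-indexing value is accidental.
-- outside the precondition, e.g. on guide_info('TT;CC', 'TTTTT'): A returns 'TTGG', B raises ValueError; on guide_info('AA;AT', 'AATG'): A returns 'AATGAT', B returns 'AAT'; on guide_info('AA;CC', 'AAGAATTCC'): A returns 'AAGCC', B returns 'AAGAATTCC'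
import Mathlib
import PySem

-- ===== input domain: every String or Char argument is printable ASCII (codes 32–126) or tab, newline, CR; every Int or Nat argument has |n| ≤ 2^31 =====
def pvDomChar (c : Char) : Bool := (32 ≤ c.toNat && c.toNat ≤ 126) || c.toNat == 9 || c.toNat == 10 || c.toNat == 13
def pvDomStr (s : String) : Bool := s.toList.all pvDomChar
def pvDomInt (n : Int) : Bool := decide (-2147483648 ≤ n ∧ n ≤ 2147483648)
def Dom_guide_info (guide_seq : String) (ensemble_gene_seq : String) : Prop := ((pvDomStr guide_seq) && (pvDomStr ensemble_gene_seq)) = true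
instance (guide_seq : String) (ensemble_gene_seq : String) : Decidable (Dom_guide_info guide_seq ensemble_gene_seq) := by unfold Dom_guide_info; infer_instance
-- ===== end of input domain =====

-- B (objective: simpler): the two-guide region is one contiguous slice of the gene between
-- the min and max of the two guide start indices, instead of A's split-and-concatenate.

-- shared helper: the complement dict {"A":"T","T":"A","G":"C","C":"G"}
def pvComplDict : PySem.Dict Char Char :=
  (((PySem.Dict.empty.insert 'A' 'T').insert 'T' 'A').insert 'G' 'C').insert 'C' 'G'

-- "".join(compl_dict[c] for c in reversed(seq)); the getD default is never used on
-- inputs admitted by Pre_ (a non-ACGT char there is Python's KeyError, excluded).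
def pvRC (l : List Char) : List Char := (l.map (fun c => pvComplDict.getD c c)).reverse

-- ===== PORT A =====
def guide_info (guide_seq : String) (ensemble_gene_seq : String) : String :=
  let sl := ensemble_gene_seq.toList
  let gl0 := guide_seq.toList
  -- if ";" not in guide_seq: if len(guide_seq) > 23: guide_seq = ";".join([left,right])
  let gl :=
    if PySem.Chars.isIn [';'] gl0 = false ∧ 23 < gl0.length then
      ((PySem.List.slice gl0 none (some 20)).map (fun c => pvComplDict.getD c c)).reverse
        ++ [';'] ++ PySem.List.slice gl0 (some (-20)) none
    else gl0
  if PySem.Chars.isIn [';'] gl = false then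
    if PySem.Chars.isIn gl sl = false then
      String.mk ((gl.map (fun c => pvComplDict.getD c c)).reverse)
    else String.mk gl
  else
    -- left, right = guide_seq.split(";")  (ValueError when parts ≠ 2: excluded by Pre_)
    let parts := PySem.Chars.splitOn gl [';']
    let left0 := PySem.Chars.strip (parts.headD [])
    let right0 := PySem.Chars.strip ((parts.drop 1).headD [])
    let left := if PySem.Chars.isIn left0 sl = false
                then ((left0.map (fun c => pvComplDict.getD c c)).reverse) else left0
    let right := if PySem.Chars.isIn right0 sl = false
                 then ((right0.map (fun c => pvComplDict.getD c c)).reverse) else right0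
    -- len(seq.split(g)[0]); split("") (empty resolved guide) is ValueError: excluded by Pre_
    let leftStart := ((PySem.Chars.splitOn sl left).headD []).length
    let rightStart := ((PySem.Chars.splitOn sl right).headD []).length
    if rightStart < leftStart then
      -- seq.split(right)[1] ([IndexError] both guides absent: excluded by Pre_)
      String.mk (right ++
        (PySem.Chars.splitOn (((PySem.Chars.splitOn sl right).drop 1).headD []) left).headD []
        ++ left)
    else
      String.mk (left ++
        (PySem.Chars.splitOn (((PySem.Chars.splitOn sl left).drop 1).headD []) right).headD []
        ++ right)

-- ===== PORT B =====
-- B's two-guide tail: resolve both guides, then one slice of the gene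
def pvTwoGuide (sl gl : List Char) : String :=
  let parts := PySem.Chars.splitOn gl [';']
  let g1' := PySem.Chars.strip (parts.headD [])
  let g2' := PySem.Chars.strip ((parts.drop 1).headD [])
  let g1 := if PySem.Chars.isIn g1' sl = false then pvRC g1' else g1'
  let g2 := if PySem.Chars.isIn g2' sl = false then pvRC g2' else g2'
  -- ensemble_gene_seq.index(g): ValueError when a guide is absent — outside Pre_
  let i := PySem.Chars.find sl g1
  let j := PySem.Chars.find sl g2
  let start := min i j
  let stop := max i j + (if i ≤ j then (g2.length : Int) else (g1.length : Int))
  String.mk (PySem.List.slice sl (some start) (some stop))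

def guide_info_alt (guide_seq : String) (ensemble_gene_seq : String) : String :=
  let sl := ensemble_gene_seq.toList
  let gl0 := guide_seq.toList
  if PySem.Chars.isIn [';'] gl0 = false then
    if 23 < gl0.length then
      pvTwoGuide sl (pvRC (PySem.List.slice gl0 none (some 20)) ++ [';']
        ++ PySem.List.slice gl0 (some (-20)) none)
    else if PySem.Chars.isIn gl0 sl then String.mk gl0 else String.mk (pvRC gl0)
  else pvTwoGuide sl gl0

-- ===== PRECONDITION & SPEC =====
def pvACGT (l : List Char) : Bool := l.all (fun c => c == 'A' || c == 'T' || c == 'G' || c == 'C')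

-- Pre_ excludes (a) the inputs on which Python A raises: KeyError of the complement dict
-- (non-ACGT character), the ValueError of unpacking split(";") (≠ 1 ';'), the ValueError
-- of split("") (empty resolved guide), the IndexError of split(g)[1] (both guides absent);
-- and (b) two-guide corners on which A's split-indexing value is accidental and B's
-- natural behaviour differs: a resolved guide absent from the gene (B's index() raises
-- a ValueError there) and overlapping/duplicated occurrences — the later guide starting
-- before the end of the earlier one, or not occurring in full before the earlier guide's
-- second occurrence — where the "region between the guides" is ill-defined.
def Pre_guide_info (guide_seq : String) (ensemble_gene_seq : String) : Prop :=
  let sl := ensemble_gene_seq.toList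
  let gl0 := guide_seq.toList
  (PySem.Chars.isIn [';'] gl0 = false ∧ 23 < gl0.length →
      pvACGT (PySem.List.slice gl0 none (some 20)) = true) ∧
  (let gl :=
    if PySem.Chars.isIn [';'] gl0 = false ∧ 23 < gl0.length then
      pvRC (PySem.List.slice gl0 none (some 20)) ++ [';'] ++ PySem.List.slice gl0 (some (-20)) none
    else gl0
   if PySem.Chars.isIn [';'] gl = false then
     (PySem.Chars.isIn gl sl = false → pvACGT gl = true)
   else
     gl.count ';' = 1 ∧
     (let left0 := PySem.Chars.strip ((PySem.Chars.splitOn gl [';']).headD [])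
      let right0 := PySem.Chars.strip (((PySem.Chars.splitOn gl [';']).drop 1).headD [])
      left0 ≠ [] ∧ right0 ≠ [] ∧
      (PySem.Chars.isIn left0 sl = false → pvACGT left0 = true) ∧
      (PySem.Chars.isIn right0 sl = false → pvACGT right0 = true) ∧
      (let L := if PySem.Chars.isIn left0 sl = false then pvRC left0 else left0
       let R := if PySem.Chars.isIn right0 sl = false then pvRC right0 else right0
       0 ≤ PySem.Chars.find sl L ∧ 0 ≤ PySem.Chars.find sl R ∧
       (let F := if PySem.Chars.find sl R < PySem.Chars.find sl L then R else L
        let S := if PySem.Chars.find sl R < PySem.Chars.find sl L then L else R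
        PySem.Chars.find sl F + F.length ≤ PySem.Chars.find sl S ∧
        (PySem.Chars.findFrom sl F (PySem.Chars.find sl F + F.length) none = -1 ∨
         PySem.Chars.find sl S + S.length ≤
           PySem.Chars.findFrom sl F (PySem.Chars.find sl F + F.length) none)))))

instance (guide_seq : String) (ensemble_gene_seq : String) : Decidable (Pre_guide_info guide_seq ensemble_gene_seq) := by
  unfold Pre_guide_info; infer_instance

def pvWitness_guide_info : String × String := ("GG;CC", "AAGGTTCCAA")

def Spec_guide_info (guide_seq : String) (ensemble_gene_seq : String) (out : String) : Prop := out = guide_info_alt guide_seq ensemble_gene_seq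
instance (guide_seq : String) (ensemble_gene_seq : String) (out : String) : Decidable (Spec_guide_info guide_seq ensemble_gene_seq out) := by unfold Spec_guide_info; infer_instance

-- ===== CLAIM (what is proved, stated in full; the proofs are below) =====
def Claim_equal_guide_info : Prop := ∀ (guide_seq : String) (ensemble_gene_seq : String), Dom_guide_info guide_seq ensemble_gene_seq → Pre_guide_info guide_seq ensemble_gene_seq → Spec_guide_info guide_seq ensemble_gene_seq (guide_info guide_seq ensemble_gene_seq)

-- ===== LEMMAS AND PROOFS =====

theorem pv_go_nil (sep : List Char) (f : Nat) (cur : List Char) (acc : List (List Char)) :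
    PySem.Chars.splitOn.go sep f [] cur acc = (cur.reverse :: acc).reverse := by
  cases f with
  | zero => show ((cur.reverse ++ []) :: acc).reverse = _ ; simp
  | succ f => rfl

theorem pv_go_cons (sep : List Char) (f : Nat) (c : Char) (rest cur : List Char) (acc : List (List Char)) :
    PySem.Chars.splitOn.go sep (f+1) (c::rest) cur acc =
      if sep.isPrefixOf (c::rest) then
        PySem.Chars.splitOn.go sep f (List.drop sep.length (c::rest)) [] (cur.reverse :: acc)
      else PySem.Chars.splitOn.go sep f rest (c :: cur) acc := rfl

theorem pv_go_irrel (sep : List Char) (hsep : sep ≠ []) :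
    ∀ (f1 f2 : Nat) (l cur : List Char) (acc : List (List Char)), l.length < f1 → l.length < f2 →
      PySem.Chars.splitOn.go sep f1 l cur acc = PySem.Chars.splitOn.go sep f2 l cur acc := by
  intro f1
  induction f1 with
  | zero => intro f2 l cur acc h1; omega
  | succ f1 ih =>
    intro f2 l cur acc h1 h2
    cases l with
    | nil => rw [pv_go_nil, pv_go_nil]
    | cons c rest =>
      cases f2 with
      | zero => simp at h2
      | succ f2 =>
        rw [pv_go_cons, pv_go_cons]
        have hslen : 0 < sep.length := List.length_pos_iff.mpr hsep
        by_cases hp : sep.isPrefixOf (c::rest)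
        · simp only [hp, if_true]
          apply ih <;>
            (simp only [List.length_drop, List.length_cons] at h1 h2 ⊢; omega)
        · simp only [hp]
          apply ih
          · simp at h1 ⊢; omega
          · simp at h2 ⊢; omega

theorem pv_go_acc (sep : List Char) (hsep : sep ≠ []) :
    ∀ (f : Nat) (l cur : List Char) (acc : List (List Char)), l.length < f →
      PySem.Chars.splitOn.go sep f l cur acc = acc.reverse ++ PySem.Chars.splitOn.go sep f l cur [] := by
  intro f
  induction f with
  | zero => intro l cur acc h; omega
  | succ f ih =>
    intro l cur acc h
    cases l with
    | nil => rw [pv_go_nil, pv_go_nil]; simp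
    | cons c rest =>
      have hslen : 0 < sep.length := List.length_pos_iff.mpr hsep
      rw [pv_go_cons, pv_go_cons]
      cases hp : sep.isPrefixOf (c::rest) with
      | true =>
        simp only [hp, if_true]
        have hlen : (List.drop sep.length (c::rest)).length < f := by
          simp only [List.length_drop, List.length_cons] at h ⊢; omega
        rw [ih _ _ _ hlen, ih _ _ ([cur.reverse]) hlen]
        simp
      | false =>
        simp only [hp, Bool.false_eq_true, if_false]
        have hlen : rest.length < f := by simp at h; omega
        rw [ih _ _ _ hlen]

theorem pv_go_noOcc (sep : List Char) (hsep : sep ≠ []) :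
    ∀ (f : Nat) (l cur : List Char) (acc : List (List Char)), l.length < f → ¬ sep <:+: l →
      PySem.Chars.splitOn.go sep f l cur acc = acc.reverse ++ [cur.reverse ++ l] := by
  intro f
  induction f with
  | zero => intro l cur acc h; omega
  | succ f ih =>
    intro l cur acc h hocc
    cases l with
    | nil => rw [pv_go_nil]; simp
    | cons c rest =>
      rw [pv_go_cons]
      have hp : sep.isPrefixOf (c::rest) = false := by
        rw [Bool.eq_false_iff]
        intro hh
        exact hocc (List.isPrefixOf_iff_prefix.mp hh).isInfix
      simp only [hp, Bool.false_eq_true, if_false]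
      have : ¬ sep <:+: rest := fun hh => hocc (hh.trans (List.suffix_cons c rest).isInfix)
      rw [ih rest (c::cur) acc (by simp at h; omega) this]
      simp

theorem pv_splitOn_def (l sep : List Char) :
    PySem.Chars.splitOn l sep = PySem.Chars.splitOn.go sep (l.length+1) l [] [] := rfl

theorem pv_go_occ (sep : List Char) (hsep : sep ≠ []) :
    ∀ (f fpos : Nat) (l cur : List Char) (acc : List (List Char)), l.length < f →
      sep <+: List.drop fpos l → (∀ i, i < fpos → ¬ sep <+: List.drop i l) →
      PySem.Chars.splitOn.go sep f l cur acc =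
        acc.reverse ++ (cur.reverse ++ l.take fpos) ::
          PySem.Chars.splitOn (l.drop (fpos + sep.length)) sep := by
  intro f
  induction f with
  | zero => intro fpos l cur acc h; omega
  | succ f ih =>
    intro fpos l cur acc h hpre hmin
    cases l with
    | nil =>
      exfalso
      rw [List.drop_nil] at hpre
      exact hsep (List.prefix_nil.mp hpre)
    | cons c rest =>
      have hslen : 0 < sep.length := List.length_pos_iff.mpr hsep
      rw [pv_go_cons]
      cases fpos with
      | zero =>
        have hp : sep.isPrefixOf (c::rest) = true := List.isPrefixOf_iff_prefix.mpr (by simpa using hpre)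
        simp only [hp, if_true]
        have hlen : (List.drop sep.length (c::rest)).length < f := by simp at h ⊢; omega
        rw [pv_go_acc sep hsep f _ _ _ hlen]
        rw [pv_go_irrel sep hsep f ((List.drop sep.length (c::rest)).length + 1) _ _ _ hlen (by omega)]
        rw [← pv_splitOn_def]
        simp
      | succ k =>
        have hp : sep.isPrefixOf (c::rest) = false := by
          rw [Bool.eq_false_iff]
          intro hh
          exact hmin 0 (by omega) (by simpa using List.isPrefixOf_iff_prefix.mp hh)
        simp only [hp, Bool.false_eq_true, if_false]
        have h1 : sep <+: List.drop k rest := by simpa using hpre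
        have h2 : ∀ i, i < k → ¬ sep <+: List.drop i rest := by
          intro i hi
          have := hmin (i+1) (by omega)
          simpa using this
        rw [ih k rest (c::cur) acc (by simp at h; omega) h1 h2]
        have : (k+1) + sep.length = (k + sep.length) + 1 := by omega
        simp [this]

theorem pv_splitOn_not_in (sep l : List Char) (hsep : sep ≠ []) (h : ¬ sep <:+: l) :
    PySem.Chars.splitOn l sep = [l] := by
  rw [pv_splitOn_def, pv_go_noOcc sep hsep _ _ _ _ (by omega) h]
  simp

theorem pv_splitOn_of_isIn (sep l : List Char) (hsep : sep ≠ [])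
    (h : PySem.Chars.isIn sep l = true) :
    PySem.Chars.splitOn l sep =
      l.take (PySem.Chars.find l sep).toNat ::
        PySem.Chars.splitOn (l.drop ((PySem.Chars.find l sep).toNat + sep.length)) sep := by
  have hnn : 0 ≤ PySem.Chars.find l sep := (PySem.Chars.find_nonneg_iff l sep).mpr
    ((PySem.Chars.isIn_iff_infix sep l).mp h)
  obtain ⟨hpre, hmin⟩ := PySem.Chars.find_spec hnn
  rw [pv_splitOn_def, pv_go_occ sep hsep _ _ _ _ _ (by omega) hpre hmin]
  simp

theorem pv_split_head (l sep : List Char) (hsep : sep ≠ []) :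
    (PySem.Chars.splitOn l sep).headD [] =
      if PySem.Chars.find l sep < 0 then l else l.take (PySem.Chars.find l sep).toNat := by
  by_cases h : PySem.Chars.isIn sep l = true
  · rw [pv_splitOn_of_isIn sep l hsep h]
    have hnn : 0 ≤ PySem.Chars.find l sep := (PySem.Chars.find_nonneg_iff l sep).mpr
      ((PySem.Chars.isIn_iff_infix sep l).mp h)
    simp [not_lt.mpr hnn]
  · have hni : ¬ sep <:+: l := fun hh => h ((PySem.Chars.isIn_iff_infix sep l).mpr hh)
    have hneg : PySem.Chars.find l sep = -1 := (PySem.Chars.find_eq_neg_one_iff l sep).mpr hni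
    rw [pv_splitOn_not_in sep l hsep hni]
    simp [hneg]

theorem pv_start (sl L : List Char) (hL : L ≠ []) :
    ((((PySem.Chars.splitOn sl L).headD []).length : Int)) =
      if PySem.Chars.find sl L < 0 then (sl.length : Int) else PySem.Chars.find sl L := by
  rw [pv_split_head sl L hL]
  by_cases h : PySem.Chars.find sl L < 0
  · simp [h]
  · have h1 : PySem.Chars.find sl L ≤ (sl.length : Int) := PySem.Chars.find_le_length sl L
    simp only [h, if_false]
    rw [List.length_take]
    push_cast
    omega

theorem pv_find_add_len_le (sl E : List Char) (h : 0 ≤ PySem.Chars.find sl E) :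
    (PySem.Chars.find sl E).toNat + E.length ≤ sl.length := by
  obtain ⟨hpre, _⟩ := PySem.Chars.find_spec h
  have := hpre.length_le
  rw [List.length_drop] at this
  have := PySem.Chars.find_le_length sl E
  omega

theorem pv_seg (sl E : List Char) (hE : E ≠ []) (hin : 0 ≤ PySem.Chars.find sl E) :
    (((PySem.Chars.splitOn sl E).drop 1).headD []) =
      PySem.List.slice sl (some (PySem.Chars.find sl E + (E.length : Int)))
        (some (if 0 ≤ PySem.Chars.findFrom sl E (PySem.Chars.find sl E + (E.length : Int)) none
               then PySem.Chars.findFrom sl E (PySem.Chars.find sl E + (E.length : Int)) none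
               else (sl.length : Int))) := by
  have hIn : PySem.Chars.isIn E sl = true := by
    rw [PySem.Chars.isIn_iff_infix]
    rw [PySem.Chars.find_nonneg_iff] at hin
    exact hin
  set f : Nat := (PySem.Chars.find sl E).toNat with hf
  have hcast : PySem.Chars.find sl E = (f : Int) := by omega
  set k : Nat := f + E.length with hk
  have hkle : k ≤ sl.length := pv_find_add_len_le sl E hin
  have hkcast : PySem.Chars.find sl E + (E.length : Int) = (k : Int) := by
    rw [hcast]; push_cast; omega
  rw [pv_splitOn_of_isIn E sl hE hIn, hkcast, PySem.Chars.findFrom_natCast sl E k hkle]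
  simp only [List.drop_succ_cons, List.drop_zero]
  by_cases habs : PySem.Chars.find (List.drop k sl) E = -1
  · -- no further occurrence of E: A keeps the whole remainder, slice to the end
    rw [pv_splitOn_not_in E _ hE ((PySem.Chars.find_eq_neg_one_iff _ _).mp habs)]
    simp only [habs, if_true]
    have h1 : ¬ ((0:Int) ≤ -1) := by omega
    simp only [h1, if_false]
    rw [PySem.List.slice_natCast sl k sl.length]
    simp only [List.headD_cons]
    rw [List.take_of_length_le (by rw [List.length_drop])]
  · have hnn : 0 ≤ PySem.Chars.find (List.drop k sl) E := by
      have := PySem.Chars.neg_one_le_find (List.drop k sl) E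
      omega
    have hIn2 : PySem.Chars.isIn E (List.drop k sl) = true := by
      rw [PySem.Chars.isIn_iff_infix, ← PySem.Chars.find_nonneg_iff]
      exact hnn
    rw [pv_splitOn_of_isIn E _ hE hIn2]
    simp only [habs, if_false, List.headD_cons]
    have h0 : (0:Int) ≤ (k:Int) + PySem.Chars.find (List.drop k sl) E := by omega
    simp only [h0, if_true]
    have h2 : (k : Int) + PySem.Chars.find (List.drop k sl) E
        = ((k + (PySem.Chars.find (List.drop k sl) E).toNat : Nat) : Int) := by
      push_cast; omega
    rw [h2, PySem.List.slice_natCast sl k (k + (PySem.Chars.find (List.drop k sl) E).toNat)]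
    congr 1
    omega

-- find points at m when sub occurs at m and nowhere earlier
theorem pv_find_eq (s sub : List Char) (m : Nat) (hp : sub <+: s.drop m)
    (hmin : ∀ i, i < m → ¬ sub <+: s.drop i) : PySem.Chars.find s sub = (m : Int) := by
  have hin : PySem.Chars.isIn sub s = true :=
    (PySem.Chars.exists_prefix_drop_iff_isIn sub s).mp ⟨m, hp⟩
  have h0 : 0 ≤ PySem.Chars.find s sub :=
    (PySem.Chars.find_nonneg_iff s sub).mpr ((PySem.Chars.isIn_iff_infix sub s).mp hin)
  obtain ⟨hp2, hmin2⟩ := PySem.Chars.find_spec h0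
  have heq : (PySem.Chars.find s sub).toNat = m := by
    rcases Nat.lt_trichotomy (PySem.Chars.find s sub).toNat m with h | h | h
    · exact absurd hp2 (hmin _ h)
    · exact h
    · exact absurd hp (hmin2 _ h)
  omega

-- the heart: A's first ++ between-piece ++ second equals one slice of the gene,
-- for F the earlier-starting resolved guide and S the later one, on clean inputs
theorem pv_dir (sl F S : List Char) (hF : F ≠ []) (hS : S ≠ [])
    (hf : 0 ≤ PySem.Chars.find sl F) (hg : 0 ≤ PySem.Chars.find sl S)
    (hgap : PySem.Chars.find sl F + F.length ≤ PySem.Chars.find sl S)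
    (he2 : PySem.Chars.findFrom sl F (PySem.Chars.find sl F + F.length) none = -1 ∨
           PySem.Chars.find sl S + S.length ≤
             PySem.Chars.findFrom sl F (PySem.Chars.find sl F + F.length) none) :
    F ++ (PySem.Chars.splitOn (((PySem.Chars.splitOn sl F).drop 1).headD []) S).headD [] ++ S
      = PySem.List.slice sl (some (PySem.Chars.find sl F))
          (some (PySem.Chars.find sl S + S.length)) := by
  have hnF : 0 < F.length := List.length_pos_iff.mpr hF
  have hnS : 0 < S.length := List.length_pos_iff.mpr hS
  obtain ⟨hpF, hminF⟩ := PySem.Chars.find_spec hf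
  obtain ⟨hpS, hminS⟩ := PySem.Chars.find_spec hg
  have hfk := pv_find_add_len_le sl F hf
  have hgk := pv_find_add_len_le sl S hg
  set f : Nat := (PySem.Chars.find sl F).toNat with hfdef
  set g : Nat := (PySem.Chars.find sl S).toNat with hgdef
  have hfc : PySem.Chars.find sl F = (f : Int) := by omega
  have hgc : PySem.Chars.find sl S = (g : Int) := by omega
  set k : Nat := f + F.length with hkdef
  have hkg : k ≤ g := by rw [hfc, hgc] at hgap; push_cast at hgap; omega
  rw [pv_seg sl F hF hf]
  rw [hfc, hgc] at he2 ⊢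
  set e2 : Int := PySem.Chars.findFrom sl F ((f : Int) + F.length) none with he2def
  set en : Nat := if 0 ≤ e2 then e2.toNat else sl.length with hendef
  have hen_cast : (if 0 ≤ e2 then e2 else ((sl.length : Nat) : Int)) = (en : Int) := by
    rw [hendef]; split_ifs <;> omega
  have hge : g + S.length ≤ en := by
    rcases he2 with h | h
    · rw [hendef, h]; norm_num; omega
    · have h0 : 0 ≤ e2 := le_trans (by positivity) h
      rw [hendef, if_pos h0]; omega
  have hcast1 : (f : Int) + (F.length : Int) = ((k : Nat) : Int) := by push_cast; omega
  rw [hcast1, hen_cast, PySem.List.slice_natCast sl k en]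
  -- the first occurrence of S inside the between-piece is at g - k
  have hfseg : PySem.Chars.find ((sl.drop k).take (en - k)) S = ((g - k : Nat) : Int) := by
    apply pv_find_eq
    · rw [List.drop_take, List.drop_drop]
      have hk1 : k + (g - k) = g := by omega
      rw [hk1]
      exact List.prefix_take_iff.mpr ⟨hpS, by omega⟩
    · intro i hi hcon
      rw [List.drop_take, List.drop_drop] at hcon
      have : S <+: sl.drop (k + i) := hcon.trans (List.take_prefix ..)
      exact hminS (k + i) (by omega) this
  rw [pv_split_head _ S hS, hfseg]
  have hnneg : ¬ (((g - k : Nat) : Int) < 0) := by omega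
  rw [if_neg hnneg]
  have htn : ((g - k : Nat) : Int).toNat = g - k := by omega
  rw [htn, List.take_take, min_eq_left (by omega : g - k ≤ en - k)]
  have hcast2 : (g : Int) + (S.length : Int) = ((g + S.length : Nat) : Int) := by push_cast; ring
  rw [hcast2, PySem.List.slice_natCast sl f (g + S.length)]
  -- assemble the three pieces into one take
  have hFeq : F = (sl.drop f).take F.length := List.prefix_iff_eq_take.mp hpF
  have hSeq : S = (sl.drop g).take S.length := List.prefix_iff_eq_take.mp hpS
  have h1 : sl.drop k = (sl.drop f).drop F.length := by rw [List.drop_drop]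
  have h2 : sl.drop g = ((sl.drop f).drop F.length).drop (g - k) := by
    rw [List.drop_drop, List.drop_drop]; congr 1; omega
  have h3 : g + S.length - f = F.length + ((g - k) + S.length) := by omega
  rw [h3, List.take_add, List.take_add]
  conv_lhs => rw [hFeq, hSeq, h1, h2]
  rw [List.append_assoc]

-- ordering the two resolved guides and joining min/max bounds into B's single slice
theorem pv_two_core (sl L R : List Char) (hL : L ≠ []) (hR : R ≠ [])
    (hfL : 0 ≤ PySem.Chars.find sl L) (hfR : 0 ≤ PySem.Chars.find sl R)
    (hgap : PySem.Chars.find sl (if PySem.Chars.find sl R < PySem.Chars.find sl L then R else L)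
        + (if PySem.Chars.find sl R < PySem.Chars.find sl L then R else L).length
        ≤ PySem.Chars.find sl (if PySem.Chars.find sl R < PySem.Chars.find sl L then L else R))
    (he2 : PySem.Chars.findFrom sl (if PySem.Chars.find sl R < PySem.Chars.find sl L then R else L)
        (PySem.Chars.find sl (if PySem.Chars.find sl R < PySem.Chars.find sl L then R else L)
          + (if PySem.Chars.find sl R < PySem.Chars.find sl L then R else L).length) none = -1 ∨
      PySem.Chars.find sl (if PySem.Chars.find sl R < PySem.Chars.find sl L then L else R)
        + (if PySem.Chars.find sl R < PySem.Chars.find sl L then L else R).length ≤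
        PySem.Chars.findFrom sl (if PySem.Chars.find sl R < PySem.Chars.find sl L then R else L)
          (PySem.Chars.find sl (if PySem.Chars.find sl R < PySem.Chars.find sl L then R else L)
            + (if PySem.Chars.find sl R < PySem.Chars.find sl L then R else L).length) none) :
    (if ((PySem.Chars.splitOn sl R).headD []).length
        < ((PySem.Chars.splitOn sl L).headD []).length then
       String.mk (R ++
         (PySem.Chars.splitOn (((PySem.Chars.splitOn sl R).drop 1).headD []) L).headD []
         ++ L)
     else
       String.mk (L ++
         (PySem.Chars.splitOn (((PySem.Chars.splitOn sl L).drop 1).headD []) R).headD []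
         ++ R))
    = String.mk (PySem.List.slice sl
        (some (min (PySem.Chars.find sl L) (PySem.Chars.find sl R)))
        (some (max (PySem.Chars.find sl L) (PySem.Chars.find sl R)
          + (if PySem.Chars.find sl L ≤ PySem.Chars.find sl R
             then (R.length : Int) else (L.length : Int))))) := by
  have h1 := pv_start sl L hL
  have h2 := pv_start sl R hR
  rw [if_neg (not_lt.mpr hfL)] at h1
  rw [if_neg (not_lt.mpr hfR)] at h2
  by_cases hc : PySem.Chars.find sl R < PySem.Chars.find sl L
  · simp only [if_pos hc] at hgap he2
    have hcond : ((PySem.Chars.splitOn sl R).headD []).length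
        < ((PySem.Chars.splitOn sl L).headD []).length := by
      rw [← Nat.cast_lt (α := Int), h1, h2]; exact hc
    rw [if_pos hcond, pv_dir sl R L hR hL hfR hfL hgap he2]
    have e1 : min (PySem.Chars.find sl L) (PySem.Chars.find sl R) = PySem.Chars.find sl R := by
      omega
    have e2 : max (PySem.Chars.find sl L) (PySem.Chars.find sl R)
        + (if PySem.Chars.find sl L ≤ PySem.Chars.find sl R
           then (R.length : Int) else (L.length : Int))
        = PySem.Chars.find sl L + L.length := by
      rw [if_neg (by omega)]; omega
    rw [e1, e2]
  · simp only [if_neg hc] at hgap he2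
    have hcond : ¬ (((PySem.Chars.splitOn sl R).headD []).length
        < ((PySem.Chars.splitOn sl L).headD []).length) := by
      rw [← Nat.cast_lt (α := Int), h1, h2]; omega
    rw [if_neg hcond, pv_dir sl L R hL hR hfL hfR hgap he2]
    have e1 : min (PySem.Chars.find sl L) (PySem.Chars.find sl R) = PySem.Chars.find sl L := by
      omega
    have e2 : max (PySem.Chars.find sl L) (PySem.Chars.find sl R)
        + (if PySem.Chars.find sl L ≤ PySem.Chars.find sl R
           then (R.length : Int) else (L.length : Int))
        = PySem.Chars.find sl R + R.length := by
      rw [if_pos (by omega)]; omega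
    rw [e1, e2]

-- A's two-guide else-branch equals B's pvTwoGuide under Pre_'s two-guide conditions
theorem pv_two (sl gl : List Char)
    (hpre : let left0 := PySem.Chars.strip ((PySem.Chars.splitOn gl [';']).headD [])
      let right0 := PySem.Chars.strip (((PySem.Chars.splitOn gl [';']).drop 1).headD [])
      left0 ≠ [] ∧ right0 ≠ [] ∧
      (let L := if PySem.Chars.isIn left0 sl = false
                then (left0.map (fun c => pvComplDict.getD c c)).reverse else left0
       let R := if PySem.Chars.isIn right0 sl = false
                then (right0.map (fun c => pvComplDict.getD c c)).reverse else right0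
       0 ≤ PySem.Chars.find sl L ∧ 0 ≤ PySem.Chars.find sl R ∧
       (let F := if PySem.Chars.find sl R < PySem.Chars.find sl L then R else L
        let S := if PySem.Chars.find sl R < PySem.Chars.find sl L then L else R
        PySem.Chars.find sl F + F.length ≤ PySem.Chars.find sl S ∧
        (PySem.Chars.findFrom sl F (PySem.Chars.find sl F + F.length) none = -1 ∨
         PySem.Chars.find sl S + S.length ≤
           PySem.Chars.findFrom sl F (PySem.Chars.find sl F + F.length) none)))) :
    (let left0 := PySem.Chars.strip ((PySem.Chars.splitOn gl [';']).headD [])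
     let right0 := PySem.Chars.strip (((PySem.Chars.splitOn gl [';']).drop 1).headD [])
     let left := if PySem.Chars.isIn left0 sl = false
                 then (left0.map (fun c => pvComplDict.getD c c)).reverse else left0
     let right := if PySem.Chars.isIn right0 sl = false
                  then (right0.map (fun c => pvComplDict.getD c c)).reverse else right0
     if ((PySem.Chars.splitOn sl right).headD []).length
         < ((PySem.Chars.splitOn sl left).headD []).length then
       String.mk (right ++
         (PySem.Chars.splitOn (((PySem.Chars.splitOn sl right).drop 1).headD []) left).headD []
         ++ left)
     else
       String.mk (left ++
         (PySem.Chars.splitOn (((PySem.Chars.splitOn sl left).drop 1).headD []) right).headD []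
         ++ right))
    = pvTwoGuide sl gl := by
  obtain ⟨hL0, hR0, hfL, hfR, hgap, he2⟩ := hpre
  unfold pvTwoGuide
  simp only [pvRC]
  apply pv_two_core sl _ _ _ _ hfL hfR hgap he2
  · split_ifs with h
    · simpa using hL0
    · exact hL0
  · split_ifs with h
    · simpa using hR0
    · exact hR0

-- the normalised long guide literally contains ';'
theorem pv_semi (a b : List Char) : PySem.Chars.isIn [';'] (a ++ [';'] ++ b) = true := by
  rw [PySem.Chars.isIn_iff_infix]
  exact ⟨a, b, by simp⟩

-- ===== VERDICT (by name: the statement is the Claim_ definition above) =====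
theorem guide_info_spec : Claim_equal_guide_info := by
  intro g s _ hpre
  unfold Spec_guide_info guide_info guide_info_alt
  unfold Pre_guide_info at hpre
  obtain ⟨hkey, hpre2⟩ := hpre
  simp only [pvRC] at hpre2
  dsimp only
  by_cases h0 : PySem.Chars.isIn [';'] g.toList = false
  · by_cases hlen : 23 < g.toList.length
    · have h1 : PySem.Chars.isIn [';'] g.toList = false ∧ 23 < g.toList.length := ⟨h0, hlen⟩
      rw [if_pos h1] at hpre2 ⊢
      rw [if_pos h0, if_pos hlen]
      have hne : ¬ (PySem.Chars.isIn [';']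
          (((PySem.List.slice g.toList none (some 20)).map (fun c => pvComplDict.getD c c)).reverse
            ++ [';'] ++ PySem.List.slice g.toList (some (-20)) none) = false) := by
        rw [pv_semi]; simp
      rw [if_neg hne] at hpre2 ⊢
      obtain ⟨-, hL0, hR0, -, -, hrest⟩ := hpre2
      have h2 := pv_two s.toList _ ⟨hL0, hR0, hrest⟩
      dsimp only at h2
      exact h2
    · have h1 : ¬ (PySem.Chars.isIn [';'] g.toList = false ∧ 23 < g.toList.length) :=
        fun h => hlen h.2
      rw [if_neg h1] at hpre2 ⊢
      rw [if_pos h0] at hpre2 ⊢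
      rw [if_pos h0, if_neg hlen]
      by_cases hin : PySem.Chars.isIn g.toList s.toList = false
      · rw [if_pos hin, if_neg (by simp [hin] : ¬ (PySem.Chars.isIn g.toList s.toList = true))]
        simp [pvRC]
      · rw [if_neg hin, if_pos (by simpa using hin : PySem.Chars.isIn g.toList s.toList = true)]
  · have h1 : ¬ (PySem.Chars.isIn [';'] g.toList = false ∧ 23 < g.toList.length) :=
      fun h => h0 h.1
    rw [if_neg h1] at hpre2 ⊢
    rw [if_neg h0] at hpre2
    rw [if_neg h0, if_neg h0]
    obtain ⟨-, hL0, hR0, -, -, hrest⟩ := hpre2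
    have h2 := pv_two s.toList _ ⟨hL0, hR0, hrest⟩
    dsimp only at h2
    exact h2
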